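-- pv_equiv track=rewrite | github.com/dozzzini/programmers | 프로그래머스/0/120869. 외계어 사전/외계어 사전.py | solution
-- ===== SOURCE A (Python) =====
-- def solution(spell, dic):
--     for d in dic:   # sod, eocd, qixm ..
--
--         # 길이가 다르면 spell을 모두 사용하는 것이 불가능
--         if len(d) != len(spell):    # len(spell)은 spell 리스트 안에 있는 단어들로 만들 수 있는 글자수
--             continue
--
--         temp = list(d)     #['s','o','m','d']
--
--         for s in spell:
--             if s in temp:
--                 temp.remove(s) # 만약 spell 에 있는 p,o,s가 sod, eocd .. 에 있으면 s 제거
--             else: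
--                 break
--
--         # temp가 비었다면 spell과 완전히 동일한 문자 구성(=spell에 들어있는 모든 단어로 단어를 만듦)
--         if len(temp) == 0:
--             return 1
--
--     return 2
-- ===== SOURCE B (Python) =====
-- def solution(spell, dic):
--     key = sorted(spell)
--     return 1 if any(sorted(d) == key for d in dic) else 2
-- ===== Notes on version B (the rewrite author's own statement) =====
-- stated objective: simpler
-- what changed: Replaces the length guard plus greedy membership-and-remove inner loop with a sort-then-compare: sorted(spell) is computed once and each word is matched by comparing its sorted characters to it.
import Mathlib
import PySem

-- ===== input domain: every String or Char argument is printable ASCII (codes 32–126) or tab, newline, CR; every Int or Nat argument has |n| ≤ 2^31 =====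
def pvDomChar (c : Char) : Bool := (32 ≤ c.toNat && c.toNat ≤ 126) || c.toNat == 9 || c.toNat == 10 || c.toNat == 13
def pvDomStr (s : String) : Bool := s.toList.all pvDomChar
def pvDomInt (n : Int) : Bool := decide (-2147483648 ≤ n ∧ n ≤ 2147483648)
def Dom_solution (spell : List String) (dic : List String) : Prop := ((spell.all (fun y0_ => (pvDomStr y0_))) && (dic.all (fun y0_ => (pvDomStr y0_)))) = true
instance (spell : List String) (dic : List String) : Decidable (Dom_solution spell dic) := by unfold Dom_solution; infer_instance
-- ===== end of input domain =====

-- B replaces A's greedy membership-and-remove inner loop by comparing each word's sorted characters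
-- with sorted(spell), computed once (objective: simpler).

-- ===== PORT A =====
-- list(d): Python yields the characters of d as length-1 strings
def pyListOfStr (d : String) : List String := d.toList.map (fun c => String.mk [c])

-- the inner 'for s in spell' loop over temp; 'else: break' returns the current temp
def removeLoop (spell : List String) (temp : List String) : List String :=
  match spell with
  | [] => temp
  | s :: rest =>
      if temp.contains s then
        removeLoop rest ((PySem.List.remove? temp s).getD temp)  -- remove succeeds: s ∈ temp
      else temp

def solution (spell : List String) (dic : List String) : Int :=
  match dic with
  | [] => 2
  | d :: rest =>
      if PySem.Str.len d ≠ (spell.length : Int) then solution spell rest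
      else
        let temp := removeLoop spell (pyListOfStr d)
        if temp.length = 0 then 1 else solution spell rest

-- ===== PORT B =====
def solution_alt (spell : List String) (dic : List String) : Int :=
  let key := PySem.List.sorted spell (fun x => x) false
  if dic.any (fun d => decide (PySem.List.sorted (pyListOfStr d) (fun x => x) false = key))
  then 1 else 2

-- ===== PRECONDITION & SPEC =====
def Spec_solution (spell : List String) (dic : List String) (out : Int) : Prop := out = solution_alt spell dic
instance (spell : List String) (dic : List String) (out : Int) : Decidable (Spec_solution spell dic out) := by unfold Spec_solution; infer_instance

-- ===== CLAIM (what is proved, stated in full; the proofs are below) =====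
def Claim_equal_solution : Prop := ∀ (spell : List String) (dic : List String), Dom_solution spell dic → Spec_solution spell dic (solution spell dic)

-- ===== LEMMAS AND PROOFS =====

-- A's per-word test (equal lengths and the greedy removal empties temp) is exactly permutation
theorem removeLoop_char : ∀ (spell chars : List String),
    (chars.length = spell.length ∧ removeLoop spell chars = []) ↔ spell.Perm chars := by
  intro spell
  induction spell with
  | nil =>
      intro chars
      constructor
      · rintro ⟨h, _⟩
        have hc : chars = [] := List.length_eq_zero_iff.mp (by simpa using h)
        simp [hc]
      · intro h
        have hc : chars = [] := h.symm.eq_nil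
        simp [removeLoop, hc]
  | cons s rest ih =>
      intro chars
      by_cases hmem : s ∈ chars
      · have hrem : PySem.List.remove? chars s = some (chars.erase s) :=
          PySem.List.remove?_eq_some_erase chars s hmem
        have hlen : (chars.erase s).length = chars.length - 1 := List.length_erase_of_mem hmem
        have hpos : 0 < chars.length := List.length_pos_of_mem hmem
        rw [List.cons_perm_iff_perm_erase]
        simp only [removeLoop, List.contains_eq_mem, hmem, decide_true, if_true, hrem,
          Option.getD_some, List.length_cons]
        rw [← ih (chars.erase s)]
        constructor
        · rintro ⟨h1, h2⟩; exact ⟨trivial, by omega, h2⟩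
        · rintro ⟨_, h1, h2⟩; exact ⟨by omega, h2⟩
      · simp only [removeLoop, List.contains_eq_mem, hmem, decide_false,
          List.length_cons]
        constructor
        · rintro ⟨h1, h2⟩
          subst h2
          simp at h1
        · intro hp
          exact absurd (hp.mem_iff.mp (List.mem_cons_self)) hmem

theorem sorted_test_iff (spell : List String) (d : String) :
    (PySem.List.sorted (pyListOfStr d) (fun x => x) false
      = PySem.List.sorted spell (fun x => x) false)
      ↔ spell.Perm (pyListOfStr d) := by
  rw [PySem.List.sorted_id_eq_sorted_id_iff_perm]
  exact ⟨fun h => h.symm, fun h => h.symm⟩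

theorem len_eq (d : String) : PySem.Str.len d = (pyListOfStr d).length := by
  simp [PySem.Str.len_eq, pyListOfStr]

theorem solution_eq_alt (spell : List String) (dic : List String) :
    solution spell dic = solution_alt spell dic := by
  induction dic with
  | nil => simp [solution, solution_alt]
  | cons d rest ih =>
      unfold solution
      by_cases hperm : spell.Perm (pyListOfStr d)
      · have hlen : (pyListOfStr d).length = spell.length ∧ removeLoop spell (pyListOfStr d) = [] :=
          (removeLoop_char spell (pyListOfStr d)).mpr hperm
        have : PySem.Str.len d = (spell.length : Int) := by
          rw [len_eq, hlen.1]
        simp only [this, ne_eq, not_true_eq_false, if_false, hlen.2, List.length_nil]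
        simp [solution_alt, List.any_cons, (sorted_test_iff spell d).mpr hperm]
      · have halt : solution_alt spell (d :: rest) = solution_alt spell rest := by
          simp only [solution_alt, List.any_cons]
          have : ¬ (PySem.List.sorted (pyListOfStr d) (fun x => x) false
              = PySem.List.sorted spell (fun x => x) false) := by
            rw [sorted_test_iff]; exact hperm
          simp [this]
        rw [halt]
        by_cases hl : PySem.Str.len d ≠ (spell.length : Int)
        · rw [if_pos hl]; exact ih
        · rw [not_not] at hl
          have hlen2 : (pyListOfStr d).length = spell.length := by
            have := len_eq d; rw [hl] at this; exact_mod_cast this.symm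
          have hne : removeLoop spell (pyListOfStr d) ≠ [] := by
            intro h
            exact hperm ((removeLoop_char spell (pyListOfStr d)).mp ⟨hlen2, h⟩)
          simp only [hl, ne_eq, not_true_eq_false, if_false]
          rw [if_neg (by simpa [List.length_eq_zero_iff] using hne)]
          exact ih

-- ===== VERDICT (by name: the statement is the Claim_ definition above) =====
theorem solution_spec : Claim_equal_solution := by
  intro spell dic _
  unfold Spec_solution
  exact solution_eq_alt spell dic
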